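-- pv_equiv track=rewrite | github.com/Belzico/SRI-final-project | matrixMaker.py | countOcurrency
-- ===== SOURCE A (Python) =====
-- def countOcurrency(countMatrix):
--     result=[]
--     docs=[]
--     for column in range(len(countMatrix[0])):
--         result.append(0)
--         docs.append([])
--         for row in range(len(countMatrix)):
--             result[column]+=countMatrix[row][column]
--             docs[column].append(row)
--     return (result,docs)
-- ===== SOURCE B (Python) =====
-- def countOcurrency(countMatrix):
--     cols = len(countMatrix[0])
--     sums = [0] * cols
--     for row in countMatrix:
--         sums = [s + x for s, x in zip(sums, row)]
--     rowIndices = list(range(len(countMatrix)))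
--     return (sums, [list(rowIndices) for _ in range(cols)])
-- ===== Notes on version B (the rewrite author's own statement) =====
-- stated objective: simpler
-- what changed: Replaces the column-major nested loop with in-place indexed accumulators by a single row-major pass folding each row into the sums with zip, and builds the identical per-column row-index lists once by a range formula instead of appending row by row.
import Mathlib
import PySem

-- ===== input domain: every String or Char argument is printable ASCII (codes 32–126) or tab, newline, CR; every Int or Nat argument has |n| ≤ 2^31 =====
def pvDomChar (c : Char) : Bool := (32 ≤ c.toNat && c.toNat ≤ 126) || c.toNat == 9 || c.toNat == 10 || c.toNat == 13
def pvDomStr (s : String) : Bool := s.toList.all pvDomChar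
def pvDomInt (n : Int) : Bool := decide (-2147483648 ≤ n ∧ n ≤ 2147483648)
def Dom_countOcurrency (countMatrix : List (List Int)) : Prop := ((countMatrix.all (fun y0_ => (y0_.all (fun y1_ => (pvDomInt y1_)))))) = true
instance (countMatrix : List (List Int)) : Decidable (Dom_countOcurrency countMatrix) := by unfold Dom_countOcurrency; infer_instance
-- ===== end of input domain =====

-- B replaces A's column-major nested loop (in-place indexed accumulators) by a single
-- row-major zip-fold and builds the per-column row-index lists by a range formula (simpler).


-- ===== PORT A =====
-- for column in range(len(countMatrix[0])): append 0 / []; for row in range(len(countMatrix)):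
--   result[column] += countMatrix[row][column]; docs[column].append(row)
-- countMatrix[0] is pyGet? (none = IndexError, excluded by Pre_); the in-range indexed reads/writes
-- are pyGetD/pySetD (exact under Pre_, which puts every index used in range).
def countOcurrency (countMatrix : List (List Int)) : List Int × List (List Int) :=
  let row0 := (PySem.List.pyGet? countMatrix 0).getD []
  (PySem.List.pyRange 0 (row0.length : Int) 1).foldl
    (fun st column =>
      let st1 : List Int × List (List Int) := (st.1 ++ [0], st.2 ++ [[]])
      (PySem.List.pyRange 0 (countMatrix.length : Int) 1).foldl
        (fun st2 row =>
          (PySem.List.pySetD st2.1 column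
             (PySem.List.pyGetD st2.1 column 0 +
              PySem.List.pyGetD (PySem.List.pyGetD countMatrix row []) column 0),
           PySem.List.pySetD st2.2 column
             (PySem.List.pyGetD st2.2 column [] ++ [row])))
        st1)
    (([] : List Int), ([] : List (List Int)))

-- ===== PORT B =====
-- cols = len(countMatrix[0]); sums = [0]*cols; for row: sums = [s+x for s,x in zip(sums,row)];
-- rowIndices = list(range(len(countMatrix))); return (sums, [list(rowIndices) for _ in range(cols)])
def countOcurrency_alt (countMatrix : List (List Int)) : List Int × List (List Int) :=
  let cols := ((PySem.List.pyGet? countMatrix 0).getD []).length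
  let sums := countMatrix.foldl
    (fun sums row => (sums.zip row).map (fun p => p.1 + p.2))
    (List.replicate cols (0 : Int))
  let rowIndices := PySem.List.pyRange 0 (countMatrix.length : Int) 1
  (sums, (PySem.List.pyRange 0 (cols : Int) 1).map (fun _ => rowIndices))

-- ===== PRECONDITION & SPEC =====
-- Pre_ excludes exactly the inputs where A raises IndexError: the empty matrix (countMatrix[0]),
-- and matrices with a row shorter than the first row (countMatrix[row][column] out of range).
def Pre_countOcurrency (countMatrix : List (List Int)) : Prop :=
  countMatrix ≠ [] ∧
  ∀ row ∈ countMatrix, (countMatrix.headD []).length ≤ row.length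
instance (countMatrix : List (List Int)) : Decidable (Pre_countOcurrency countMatrix) := by
  unfold Pre_countOcurrency; infer_instance
def pvWitness_countOcurrency : List (List Int) := [[1, 2], [3, 4], [5, 6]]
def Spec_countOcurrency (countMatrix : List (List Int)) (out : List Int × List (List Int)) : Prop := out = countOcurrency_alt countMatrix
instance (countMatrix : List (List Int)) (out : List Int × List (List Int)) : Decidable (Spec_countOcurrency countMatrix out) := by unfold Spec_countOcurrency; infer_instance

-- ===== CLAIM (what is proved, stated in full; the proofs are below) =====
def Claim_equal_countOcurrency : Prop := ∀ (countMatrix : List (List Int)), Dom_countOcurrency countMatrix → Pre_countOcurrency countMatrix → Spec_countOcurrency countMatrix (countOcurrency countMatrix)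

-- ===== LEMMAS AND PROOFS =====

-- per-column sum of the matrix, the common closed form both loops compute
def pvColSum (m : List (List Int)) (c : Nat) : Int :=
  (m.map (fun row => row.getD c 0)).sum

theorem pv_getD_append_last {α : Type} (d : α) (r : List α) (x : α) (n : Nat)
    (h : r.length = n) : (r ++ [x]).getD n d = x := by
  subst h; simp [List.getD]

theorem pv_set_append_last {α : Type} (r : List α) (x v : α) (n : Nat)
    (h : r.length = n) : (r ++ [x]).set n v = r ++ [v] := by
  subst h
  induction r with
  | nil => rfl
  | cons a r ih => simp [ih]

-- A's inner row loop, on a state whose lists have exactly column+1 slots, only updates the last slot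
theorem pv_innerA (m : List (List Int)) (c : Nat) :
    ∀ (L : List Int) (r : List Int) (d : List (List Int)) (x : Int) (y : List Int),
    r.length = c → d.length = c →
    L.foldl
      (fun st2 row =>
        (PySem.List.pySetD st2.1 (c : Int)
           (PySem.List.pyGetD st2.1 (c : Int) 0 +
            PySem.List.pyGetD (PySem.List.pyGetD m row []) (c : Int) 0),
         PySem.List.pySetD st2.2 (c : Int)
           (PySem.List.pyGetD st2.2 (c : Int) [] ++ [row])))
      (r ++ [x], d ++ [y])
    = (r ++ [x + (L.map (fun row => PySem.List.pyGetD (PySem.List.pyGetD m row []) (c : Int) 0)).sum],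
       d ++ [y ++ L]) := by
  intro L
  induction L with
  | nil => intro r d x y hr hd; simp
  | cons row L ih =>
    intro r d x y hr hd
    simp only [List.foldl_cons]
    simp only [PySem.List.pySetD_natCast, PySem.List.pyGetD_natCast] at ih ⊢
    rw [pv_getD_append_last 0 r x c hr, pv_getD_append_last [] d y c hd,
        pv_set_append_last r x _ c hr, pv_set_append_last d y _ c hd]
    rw [ih r d _ _ hr hd]
    simp [add_assoc]

-- A's outer column loop builds the two closed-form lists column by column
theorem pv_outerA (m : List (List Int)) :
    ∀ (cols : Nat),
    (PySem.List.pyRange 0 (cols : Int) 1).foldl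
      (fun st column =>
        let st1 : List Int × List (List Int) := (st.1 ++ [0], st.2 ++ [[]])
        (PySem.List.pyRange 0 (m.length : Int) 1).foldl
          (fun st2 row =>
            (PySem.List.pySetD st2.1 column
               (PySem.List.pyGetD st2.1 column 0 +
                PySem.List.pyGetD (PySem.List.pyGetD m row []) column 0),
             PySem.List.pySetD st2.2 column
               (PySem.List.pyGetD st2.2 column [] ++ [row])))
          st1)
      (([] : List Int), ([] : List (List Int)))
    = ((List.range cols).map (fun c => pvColSum m c),
       (List.range cols).map (fun _ => PySem.List.pyRange 0 (m.length : Int) 1)) := by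
  intro cols
  induction cols with
  | zero => simp [PySem.List.pyRange_zero_nat]
  | succ c ih =>
    rw [show ((c + 1 : Nat) : Int) = (c : Int) + 1 by push_cast; ring,
        PySem.List.pyRange_one_succ_right (by positivity), List.foldl_append, ih]
    simp only [List.foldl_cons, List.foldl_nil, List.range_succ, List.map_append, List.map_cons,
      List.map_nil]
    rw [pv_innerA m c _ _ _ 0 [] (by simp) (by simp)]
    simp only [Prod.mk.injEq]
    constructor
    · congr 1
      rw [show (fun row => PySem.List.pyGetD (PySem.List.pyGetD m row []) (c : Int) 0)
            = (fun r => PySem.List.pyGetD r (c : Int) 0) ∘ (fun row => PySem.List.pyGetD m row []) from rfl,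
          ← List.map_map, PySem.List.map_pyGetD_pyRange_zero']
      simp [pvColSum]
    · simp

-- one zip-fold step of B on a map-over-range state, when the row is long enough
theorem pv_zipstep (cols : Nat) (g : Nat → Int) (row : List Int) (h : cols ≤ row.length) :
    ((((List.range cols).map g).zip row).map (fun p => p.1 + p.2))
    = (List.range cols).map (fun c => g c + row.getD c 0) := by
  apply List.ext_getElem
  · simp [Nat.min_eq_left h]
  · intro i h1 h2
    have hi : i < cols := by simpa using h2
    have hir : i < row.length := lt_of_lt_of_le hi h
    simp [List.getElem_zip, List.getD_eq_getElem?_getD, List.getElem?_eq_getElem hir]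

-- B's row fold computes the per-column sums
theorem pv_foldB (cols : Nat) :
    ∀ (m : List (List Int)), (∀ row ∈ m, cols ≤ row.length) → ∀ (g : Nat → Int),
    m.foldl (fun sums row => (sums.zip row).map (fun p => p.1 + p.2))
      ((List.range cols).map g)
    = (List.range cols).map (fun c => g c + pvColSum m c) := by
  intro m
  induction m with
  | nil => intro _ g; simp [pvColSum]
  | cons row m ih =>
    intro hlen g
    simp only [List.foldl_cons]
    rw [pv_zipstep cols g row (hlen row (by simp))]
    rw [ih (fun r hr => hlen r (by simp [hr])) (fun c => g c + row.getD c 0)]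
    apply List.map_congr_left
    intro c _
    simp [pvColSum, add_assoc]

-- ===== VERDICT (by name: the statement is the Claim_ definition above) =====
theorem countOcurrency_spec : Claim_equal_countOcurrency := by
  intro m _ hpre
  obtain ⟨hne, hlen⟩ := hpre
  unfold Spec_countOcurrency countOcurrency countOcurrency_alt
  dsimp only
  have h0 : (PySem.List.pyGet? m 0).getD [] = m.headD [] := by
    cases m with
    | nil => exact absurd rfl hne
    | cons a t => simp [PySem.List.pyGet?, PySem.List.pyIdx?]
  set cols := (m.headD []).length with hc
  rw [h0, pv_outerA m cols]
  have hrep : (List.replicate cols (0 : Int)) = (List.range cols).map (fun _ => (0 : Int)) := by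
    simp [List.map_const']
  rw [hrep, pv_foldB cols m hlen (fun _ => 0)]
  simp only [Prod.mk.injEq]
  refine ⟨by simp, ?_⟩
  rw [PySem.List.pyRange_one]
  simp
  rw [hc]
  cases m with
  | nil => exact absurd rfl hne
  | cons a t => simp
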